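-- pv_equiv track=rewrite | github.com/oleksandr-medviediev/campus_2018_python | Oleksandr_Kotov/3/matrix.py | read_matrix_rows
-- ===== SOURCE A (Python) =====
-- def read_matrix_rows(matrix):
--     """read matrix row by row"""
--
--     output = ""
--
--     row = []
--
--     number = ""
--
--     for char in matrix:
--
--         if char.isnumeric():
--             number += char
--
--         elif char == '\n':
--
--             row.append(number)
--             number = ""
--
--             for element in row:
--                 output += element + ', '
--
--             output = output[:-2]
--             output += '\n'
--             row = []
--
--         else:
--
--             row.append(number)
--             number = ""
--     else:
--
--         row.append(number)
--
--         for element in row: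
--             output += element + ', '
--
--         output = output[:-2]
--         output += '\n'
--
--
--     return output
-- ===== SOURCE B (Python) =====
-- def read_matrix_rows(matrix):
--     """read matrix row by row"""
--     processed = []
--     for line in matrix.split('\n'):
--         marked = ''.join(c if c.isnumeric() else '\x01' for c in line)
--         processed.append(', '.join(marked.split('\x01')))
--     return '\n'.join(processed) + '\n'
-- ===== Notes on version B (the rewrite author's own statement) =====
-- stated objective: simpler
-- what changed: Replaces A's character-by-character accumulator with flush-on-newline and Python's for-else by a three-phase split/transform/join pipeline (split into lines, mark non-numeric chars as separators, rejoin with ', ' and '\n').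
import Mathlib
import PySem

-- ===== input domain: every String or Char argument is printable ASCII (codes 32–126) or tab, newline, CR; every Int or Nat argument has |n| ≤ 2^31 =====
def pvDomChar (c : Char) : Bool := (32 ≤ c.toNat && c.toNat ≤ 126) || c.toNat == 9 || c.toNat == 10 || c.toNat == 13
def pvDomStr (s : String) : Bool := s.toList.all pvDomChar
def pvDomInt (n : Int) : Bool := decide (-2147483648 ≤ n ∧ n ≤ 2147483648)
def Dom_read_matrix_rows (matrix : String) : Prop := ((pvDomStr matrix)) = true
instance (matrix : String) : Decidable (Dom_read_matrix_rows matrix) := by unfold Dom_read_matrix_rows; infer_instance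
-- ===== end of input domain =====

-- B re-serializes by split/transform/join phases instead of A's char accumulator with flush-on-newline; same O(n) cost, simpler decomposition.
-- Python's `isnumeric` is ported as PySem.Chars.isdigit, which coincides with it on the domain's characters (printable ASCII, tab, newline, CR).

-- ===== PORT A =====
-- state = (output, row, number), exactly A's three variables
def pvAStep (st : List Char × List (List Char) × List Char) (c : Char) :
    List Char × List (List Char) × List Char :=
  let (out, row, num) := st
  if PySem.Chars.isdigit c then (out, row, num ++ [c])
  else if c = '\n' then
    let row2 := row ++ [num]
    let out2 := row2.foldl (fun o e => o ++ e ++ [',', ' ']) out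
    (PySem.List.slice out2 none (some (-2)) ++ ['\n'], [], [])
  else (out, row ++ [num], [])

def read_matrix_rows (matrix : String) : String :=
  let st := matrix.toList.foldl pvAStep ([], [], [])
  -- for-else clause: runs after the loop
  let row2 := st.2.1 ++ [st.2.2]
  let out2 := row2.foldl (fun o e => o ++ e ++ [',', ' ']) st.1
  String.ofList (PySem.List.slice out2 none (some (-2)) ++ ['\n'])

-- ===== PORT B =====
def pvMark (c : Char) : Char := if PySem.Chars.isdigit c then c else '\x01'

def pvLine (line : List Char) : List Char :=
  PySem.Chars.join [',', ' '] (PySem.Chars.splitOn (line.map pvMark) ['\x01'])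

def read_matrix_rows_alt (matrix : String) : String :=
  let lines := PySem.Chars.splitOn matrix.toList ['\n']
  String.ofList (PySem.Chars.join ['\n'] (lines.map pvLine) ++ ['\n'])

-- ===== PRECONDITION & SPEC =====
def Spec_read_matrix_rows (matrix : String) (out : String) : Prop := out = read_matrix_rows_alt matrix
instance (matrix : String) (out : String) : Decidable (Spec_read_matrix_rows matrix out) := by unfold Spec_read_matrix_rows; infer_instance

-- ===== CLAIM (what is proved, stated in full; the proofs are below) =====
def Claim_equal_read_matrix_rows : Prop := ∀ (matrix : String), Dom_read_matrix_rows matrix → Spec_read_matrix_rows matrix (read_matrix_rows matrix)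

-- ===== LEMMAS AND PROOFS =====

-- splitting on a one-char separator, with the current piece as accumulator
def pvSplit1 (d : Char) (pre : List Char) : List Char → List (List Char)
  | [] => [pre]
  | c :: r => if c = d then pre :: pvSplit1 d [] r else pvSplit1 d (pre ++ [c]) r

theorem pvGo_spec (d : Char) (l : List Char) (fuel : Nat) (cur : List Char) (acc : List (List Char))
    (h : l.length < fuel) :
    PySem.Chars.splitOn.go [d] fuel l cur acc = acc.reverse ++ pvSplit1 d cur.reverse l := by
  induction l generalizing fuel cur acc with
  | nil =>
    cases fuel with
    | zero => omega
    | succ f => simp [PySem.Chars.splitOn.go, pvSplit1]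
  | cons c r ih =>
    cases fuel with
    | zero => omega
    | succ f =>
      have hf : r.length < f := by simpa using h
      simp only [PySem.Chars.splitOn.go, List.isPrefixOf, pvSplit1]
      by_cases hc : c = d
      · simp [hc, ih f [] (cur.reverse :: acc) hf]
      · have : (d == c) = false := by simp [Ne.symm hc]
        simp [this, hc, ih f (c :: cur) acc hf]

theorem pvSplitOn_eq (d : Char) (l : List Char) :
    PySem.Chars.splitOn l [d] = pvSplit1 d [] l := by
  simpa using pvGo_spec d l (l.length + 1) [] [] (by omega)

theorem pvSplit1_ne_nil (d : Char) (pre l : List Char) : pvSplit1 d pre l ≠ [] := by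
  induction l generalizing pre with
  | nil => simp [pvSplit1]
  | cons c r ih =>
    by_cases hc : c = d <;> simp [pvSplit1, hc, ih]

-- ''.join-with-trailing-separator as a flatMap
theorem pvFlatJoin (sep : List Char) (xs : List (List Char)) (h : xs ≠ []) :
    xs.flatMap (· ++ sep) = PySem.Chars.join sep xs ++ sep := by
  induction xs with
  | nil => simp at h
  | cons x rest ih =>
    cases rest with
    | nil => simp [PySem.Chars.join, List.intercalate]
    | cons y t =>
      rw [List.flatMap_cons, ih (by simp), PySem.Chars.join_cons_cons]
      simp

-- tokenizing a line at non-digit characters, with the current token as accumulator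
def pvTok (num : List Char) : List Char → List (List Char)
  | [] => [num]
  | c :: r => if PySem.Chars.isdigit c then pvTok (num ++ [c]) r else num :: pvTok [] r

theorem pvMark_split (l num : List Char) :
    pvSplit1 '\x01' num (l.map pvMark) = pvTok num l := by
  induction l generalizing num with
  | nil => simp [pvSplit1, pvTok]
  | cons c r ih =>
    by_cases hd : PySem.Chars.isdigit c
    · have hne : c ≠ '\x01' := by
        intro h; rw [h] at hd; exact absurd hd (by decide)
      simp [pvMark, pvSplit1, pvTok, hd, hne, ih]
    · simp [pvMark, pvSplit1, pvTok, hd, ih]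

theorem pvLine_eq (l : List Char) :
    pvLine l = PySem.Chars.join [',', ' '] (pvTok [] l) := by
  rw [pvLine, pvSplitOn_eq, pvMark_split]

-- A's flush: append every element + ', ', slice off the trailing ', ', is a ', '-join
theorem pvFlush (out : List Char) (xs : List (List Char)) (h : xs ≠ []) :
    PySem.List.slice (xs.foldl (fun o e => o ++ e ++ [',', ' ']) out) none (some (-2))
      = out ++ PySem.Chars.join [',', ' '] xs := by
  have hbody : (fun (o e : List Char) => o ++ e ++ [',', ' '])
      = (fun (o e : List Char) => o ++ (e ++ [',', ' '])) := by
    funext o e; simp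
  rw [hbody, PySem.List.foldl_append_eq_flatMap, pvFlatJoin _ _ h,
      PySem.List.slice_to_neg_ofNat _ 2 (by omega)]
  rw [show out ++ (PySem.Chars.join [',', ' '] xs ++ [',', ' '])
        = (out ++ PySem.Chars.join [',', ' '] xs) ++ [',', ' '] by simp]
  have hlen : ((out ++ PySem.Chars.join [',', ' '] xs) ++ [',', ' ']).length - 2
      = (out ++ PySem.Chars.join [',', ' '] xs).length := by simp; omega
  rw [hlen, List.take_left]

-- the joint spec of both programs: row of finished tokens, current token, rest of the input
def pvSpec (row : List (List Char)) (num : List Char) : List Char → List Char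
  | [] => PySem.Chars.join [',', ' '] (row ++ [num]) ++ ['\n']
  | c :: r =>
    if PySem.Chars.isdigit c then pvSpec row (num ++ [c]) r
    else if c = '\n' then PySem.Chars.join [',', ' '] (row ++ [num]) ++ ['\n'] ++ pvSpec [] [] r
    else pvSpec (row ++ [num]) [] r

theorem pvALoop (cs : List Char) (out : List Char) (row : List (List Char)) (num : List Char) :
    PySem.List.slice
        (((cs.foldl pvAStep (out, row, num)).2.1 ++ [(cs.foldl pvAStep (out, row, num)).2.2]).foldl
          (fun o e => o ++ e ++ [',', ' ']) (cs.foldl pvAStep (out, row, num)).1)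
        none (some (-2)) ++ ['\n']
      = out ++ pvSpec row num cs := by
  induction cs generalizing out row num with
  | nil =>
    simp only [List.foldl_nil, pvSpec]
    rw [pvFlush out (row ++ [num]) (by simp)]
    simp
  | cons c r ih =>
    by_cases hd : PySem.Chars.isdigit c
    · simp only [List.foldl_cons, pvAStep, hd, if_true, pvSpec]
      exact ih out row (num ++ [c])
    · by_cases hn : c = '\n'
      · have hd' : PySem.Chars.isdigit '\n' = false := by decide
        subst hn
        simp only [List.foldl_cons, pvAStep, hd', Bool.false_eq_true, if_false, if_true, pvSpec]
        rw [ih _ [] [], pvFlush out (row ++ [num]) (by simp)]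
        simp
      · simp only [List.foldl_cons, pvAStep, hd, hn, if_false, pvSpec]
        exact ih out (row ++ [num]) []

-- B's per-line pipeline, fused over the list of lines with the current raw line as accumulator
def pvLineAcc (pre : List Char) : List Char → List Char
  | [] => pvLine pre ++ ['\n']
  | c :: r => if c = '\n' then pvLine pre ++ ['\n'] ++ pvLineAcc [] r else pvLineAcc (pre ++ [c]) r

theorem pvM (cs pre : List Char) :
    (pvSplit1 '\n' pre cs).flatMap (fun l => pvLine l ++ ['\n']) = pvLineAcc pre cs := by
  induction cs generalizing pre with
  | nil => simp [pvSplit1, pvLineAcc]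
  | cons c r ih =>
    by_cases hn : c = '\n' <;> simp [pvSplit1, pvLineAcc, hn, ih]

theorem pvN (cs : List Char) (pre : List Char) (row : List (List Char)) (num : List Char)
    (hlink : ∀ t, pvTok [] (pre ++ t) = row ++ pvTok num t) :
    pvLineAcc pre cs = pvSpec row num cs := by
  induction cs generalizing pre row num with
  | nil =>
    have h0 := hlink []
    simp only [List.append_nil, pvTok] at h0
    simp only [pvLineAcc, pvSpec, pvLine_eq, h0]
  | cons c r ih =>
    by_cases hd : PySem.Chars.isdigit c
    · have hn : c ≠ '\n' := by
        intro h; rw [h] at hd; exact absurd hd (by decide)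
      simp only [pvLineAcc, hn, if_false, pvSpec, hd, if_true]
      refine ih (pre ++ [c]) row (num ++ [c]) (fun t => ?_)
      have := hlink (c :: t)
      simpa [pvTok, hd] using this
    · by_cases hn : c = '\n'
      · have h0 := hlink []
        simp only [List.append_nil, pvTok] at h0
        have hd' : PySem.Chars.isdigit '\n' = false := by decide
        subst hn
        simp only [pvLineAcc, if_true, pvSpec, hd', Bool.false_eq_true, if_false, pvLine_eq, h0]
        rw [ih [] [] [] (fun t => by simp)]
      · simp only [pvLineAcc, hn, if_false, pvSpec, hd]
        refine ih (pre ++ [c]) (row ++ [num]) [] (fun t => ?_)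
        have := hlink (c :: t)
        simpa [pvTok, hd] using this

theorem pvAlt_eq (cs : List Char) :
    PySem.Chars.join ['\n'] ((PySem.Chars.splitOn cs ['\n']).map pvLine) ++ ['\n']
      = pvSpec [] [] cs := by
  have hne : (PySem.Chars.splitOn cs ['\n']).map pvLine ≠ [] := by
    rw [pvSplitOn_eq]
    simp [pvSplit1_ne_nil]
  rw [← pvFlatJoin ['\n'] _ hne, List.flatMap_map, pvSplitOn_eq, pvM, pvN cs [] [] [] (fun t => by simp)]

-- ===== VERDICT (by name: the statement is the Claim_ definition above) =====
theorem read_matrix_rows_spec : Claim_equal_read_matrix_rows := by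
  intro matrix _
  show read_matrix_rows matrix = read_matrix_rows_alt matrix
  have hA := pvALoop matrix.toList [] [] []
  simp only [List.nil_append] at hA
  have hB := pvAlt_eq matrix.toList
  simp only [read_matrix_rows, read_matrix_rows_alt, hA, hB]
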